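-- pv_equiv track=rewrite | github.com/SAncho077/Python522 | dz/231.py | skolko
-- ===== SOURCE A (Python) =====
-- def skolko(lst):
--     if len(lst) == 0:
--         return 0
--     else:
--         coint = 0
--         if lst[0] <= -1:
--             coint += 1
--
--         return coint + skolko(lst[1:])
-- ===== SOURCE B (Python) =====
-- def skolko(lst):
--     count = 0
--     for x in lst:
--         if x <= -1:
--             count += 1
--     return count
-- ===== Notes on version B (the rewrite author's own statement) =====
-- stated objective: simpler
-- what changed: Recursion over lst[1:] slices replaced by a single iterative loop with a counter accumulator.
import Mathlib
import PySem

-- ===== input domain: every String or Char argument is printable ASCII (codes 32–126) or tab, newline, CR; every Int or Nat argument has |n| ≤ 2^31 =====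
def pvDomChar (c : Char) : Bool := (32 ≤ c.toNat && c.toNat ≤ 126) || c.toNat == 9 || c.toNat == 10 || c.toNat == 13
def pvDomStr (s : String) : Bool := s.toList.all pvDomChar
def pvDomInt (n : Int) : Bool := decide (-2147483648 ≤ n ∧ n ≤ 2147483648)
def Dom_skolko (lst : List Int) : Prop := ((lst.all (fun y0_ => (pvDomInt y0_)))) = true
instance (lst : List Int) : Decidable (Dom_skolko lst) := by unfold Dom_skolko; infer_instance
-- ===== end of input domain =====

-- B replaces the recursion over lst[1:] slices with one iterative pass keeping a counter (simpler, linear).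

-- ===== PORT A =====
-- literal transliteration: empty check, count the head, recurse on the tail slice
def skolko (lst : List Int) : Int :=
  if lst.length = 0 then 0
  else
    let coint : Int := 0
    let coint := if (PySem.List.pyGet? lst 0).getD 0 ≤ -1 then coint + 1 else coint
    coint + skolko (PySem.List.slice lst (some 1) none)
termination_by lst.length
decreasing_by
  simp [PySem.List.slice_from_one]
  cases lst with
  | nil => simp_all
  | cons a as => simp

-- ===== PORT B =====
-- iterative loop with an accumulator (foldl over the list)
def skolko_alt (lst : List Int) : Int :=
  lst.foldl (fun count x => if x ≤ -1 then count + 1 else count) 0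

-- ===== PRECONDITION & SPEC =====
def Spec_skolko (lst : List Int) (out : Int) : Prop := out = skolko_alt lst
instance (lst : List Int) (out : Int) : Decidable (Spec_skolko lst out) := by unfold Spec_skolko; infer_instance

-- ===== CLAIM (what is proved, stated in full; the proofs are below) =====
def Claim_equal_skolko : Prop := ∀ (lst : List Int), Dom_skolko lst → Spec_skolko lst (skolko lst)

-- ===== LEMMAS AND PROOFS =====
theorem skolko_alt_cons (xs : List Int) (c : Int) :
    xs.foldl (fun count x => if x ≤ -1 then count + 1 else count) c
      = c + xs.foldl (fun count x => if x ≤ -1 then count + 1 else count) 0 := by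
  induction xs generalizing c with
  | nil => simp
  | cons y ys ih =>
    simp only [List.foldl_cons]
    rw [ih, ih (if y ≤ -1 then 0 + 1 else 0)]
    split <;> ring

theorem skolko_eq (lst : List Int) : skolko lst = skolko_alt lst := by
  induction lst with
  | nil => rw [skolko]; simp [skolko_alt]
  | cons x xs ih =>
    rw [skolko]
    have hg : (PySem.List.pyGet? (x :: xs) 0).getD 0 = x := by
      simp [PySem.List.pyGet?, PySem.List.pyIdx?]
    simp only [List.length_cons, PySem.List.slice_from_one, List.tail_cons, ih, hg, zero_add]
    rw [if_neg (Nat.succ_ne_zero _)]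
    unfold skolko_alt
    simp only [List.foldl_cons]
    split
    · rw [skolko_alt_cons xs (0 + 1)]
      norm_num
    · norm_num

-- ===== VERDICT (by name: the statement is the Claim_ definition above) =====
theorem skolko_spec : Claim_equal_skolko := by
  intro lst _
  unfold Spec_skolko
  exact skolko_eq lst
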